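-- pv_equiv track=rewrite | github.com/TaySippapas/SEN201_SmartVision | my_flask_app/app/sales.py | combine_items
-- ===== SOURCE A (Python) =====
-- from collections import defaultdict
-- from typing import DefaultDict, Dict, Iterable, List, Tuple
--
-- def combine_items(items: List[dict]) -> Tuple[Dict[int, int], dict | None]:
--   combined: DefaultDict[int, int] = defaultdict(int)
--   if not items or not isinstance(items, list):
--     return {}, {"error": "invalid_input", "detail": "items must be a non-empty list"}
--
--   for it in items:
--     try:
--       pid = int(it["product_id"])
--       qty = int(it["quantity"])
--     except (KeyError, ValueError, TypeError):
--       return {}, {"error": "invalid_item", "detail": f"Bad item format: {it!r}"}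
--     if qty <= 0:
--       return {}, {
--         "error": "invalid_quantity",
--         "detail": f"Quantity must be > 0 for product_id {it.get('product_id')}",
--       }
--     combined[pid] += qty
--   return dict(combined), None
-- ===== SOURCE B (Python) =====
-- def combine_items(items):
--     if not items or not isinstance(items, list):
--         return {}, {"error": "invalid_input", "detail": "items must be a non-empty list"}
--     # phase 1: parse and validate, first error wins
--     parsed = []
--     for it in items:
--         try:
--             pair = (int(it["product_id"]), int(it["quantity"]))
--         except (KeyError, ValueError, TypeError):
--             return {}, {"error": "invalid_item", "detail": f"Bad item format: {it!r}"}
--         if pair[1] <= 0: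
--             return {}, {
--                 "error": "invalid_quantity",
--                 "detail": f"Quantity must be > 0 for product_id {it.get('product_id')}",
--             }
--         parsed.append(pair)
--     # phase 2: for each product id (order of first appearance), sum its quantities
--     order = list(dict.fromkeys(pid for pid, _ in parsed))
--     return {pid: sum(q for p, q in parsed if p == pid) for pid in order}, None
-- ===== Notes on version B (the rewrite author's own statement) =====
-- stated objective: alternative
-- what changed: B splits A's single validate-and-accumulate loop into two phases: one pass that parses/validates every item (first error wins, same message strings), then a separate aggregation that dedups the product ids in first-appearance order and sums each id's quantities, instead of threading a defaultdict through the validation loop.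
import Mathlib
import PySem

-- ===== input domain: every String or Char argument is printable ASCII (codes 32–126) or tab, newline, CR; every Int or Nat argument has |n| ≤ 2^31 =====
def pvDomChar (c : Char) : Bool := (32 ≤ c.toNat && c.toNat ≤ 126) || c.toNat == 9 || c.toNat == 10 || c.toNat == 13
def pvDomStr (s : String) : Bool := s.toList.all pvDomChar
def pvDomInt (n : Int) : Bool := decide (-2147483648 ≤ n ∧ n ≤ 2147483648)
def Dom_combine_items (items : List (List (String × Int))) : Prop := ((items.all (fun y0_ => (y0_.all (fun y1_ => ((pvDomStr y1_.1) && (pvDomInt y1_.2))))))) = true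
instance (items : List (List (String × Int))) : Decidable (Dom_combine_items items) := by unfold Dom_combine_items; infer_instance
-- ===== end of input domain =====

-- B replaces A's single validate-and-accumulate loop by a validation pass followed by a separate
-- dedup-and-sum aggregation of the parsed pairs (objective: alternative decomposition, not faster).

-- ===== PORT A =====
-- Python repr of a str (f"{it!r}"), exact on Dom's character set (printable ASCII, tab, newline, CR);
-- this f-string appears verbatim in both Python sources, so both ports share the helper.
def pyReprStrChars (s : String) : List Char :=
  let cs := s.toList
  let q : Char := if cs.contains '\'' && !cs.contains '"' then '"' else '\''
  q :: cs.flatMap (fun c =>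
    if c = '\\' then ['\\', '\\']
    else if c = '\t' then ['\\', 't']
    else if c = '\n' then ['\\', 'n']
    else if c = '\r' then ['\\', 'r']
    else if c = q then ['\\', q]
    else [c]) ++ [q]

-- Python repr of the dict it (insertion order; every item's value is an int here)
def pyReprItemChars (it : List (String × Int)) : List Char :=
  '{' :: (List.intercalate [',', ' ']
    (it.map (fun kv => pyReprStrChars kv.1 ++ ':' :: ' ' :: PySem.Int.toChars kv.2))) ++ ['}']

-- f"... {it.get('product_id')}": str() of the lookup, "None" when the key is absent
def pyStrGetPidChars (it : List (String × Int)) : List Char :=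
  match (PySem.Dict.mk it).get? "product_id" with
  | some v => PySem.Int.toChars v
  | none => "None".toList

def errInvalidItem (it : List (String × Int)) : List (String × String) :=
  [("error", "invalid_item"),
   ("detail", String.ofList ("Bad item format: ".toList ++ pyReprItemChars it))]

def errInvalidQty (it : List (String × Int)) : List (String × String) :=
  [("error", "invalid_quantity"),
   ("detail", String.ofList ("Quantity must be > 0 for product_id ".toList ++ pyStrGetPidChars it))]

def errInvalidInput : List (String × String) :=
  [("error", "invalid_input"), ("detail", "items must be a non-empty list")]

-- A's loop: try int(it["product_id"]), int(it["quantity"]) (values are ints, so only KeyError is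
-- reachable → the get? lookups), then the qty <= 0 check, then combined[pid] += qty on the defaultdict.
def combineLoopA (d : PySem.Dict Int Int) :
    List (List (String × Int)) → (List (Int × Int)) × (Option (List (String × String)))
  | [] => (d.items, none)
  | it :: rest =>
    match (PySem.Dict.mk it).get? "product_id", (PySem.Dict.mk it).get? "quantity" with
    | some pid, some qty =>
      if qty ≤ 0 then ([], some (errInvalidQty it))
      else combineLoopA (d.modify pid 0 (· + qty)) rest
    | _, _ => ([], some (errInvalidItem it))

def combine_items (items : List (List (String × Int))) :
    (List (Int × Int)) × (Option (List (String × String))) :=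
  if items.isEmpty then ([], some errInvalidInput)
  else combineLoopA PySem.Dict.empty items

-- ===== PORT B =====
-- phase 1: parse and validate, first error wins
def parseItemsB :
    List (List (String × Int)) → Except (List (String × String)) (List (Int × Int))
  | [] => .ok []
  | it :: rest =>
    match (PySem.Dict.mk it).get? "product_id", (PySem.Dict.mk it).get? "quantity" with
    | some pid, some qty =>
      if qty ≤ 0 then .error (errInvalidQty it)
      else
        match parseItemsB rest with
        | .ok ps => .ok ((pid, qty) :: ps)
        | .error e => .error e
    | _, _ => .error (errInvalidItem it)

def combine_items_alt (items : List (List (String × Int))) :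
    (List (Int × Int)) × (Option (List (String × String))) :=
  if items.isEmpty then ([], some errInvalidInput)
  else
    match parseItemsB items with
    | .error e => ([], some e)
    | .ok parsed =>
      -- phase 2: dict.fromkeys order of first appearance, then sum each id's quantities
      ((PySem.List.dedup (parsed.map (·.1))).map
        (fun pid => (pid, ((parsed.filter (fun pq => pq.1 = pid)).map (·.2)).sum)), none)

-- ===== PRECONDITION & SPEC =====
def Spec_combine_items (items : List (List (String × Int))) (out : (List (Int × Int)) × (Option (List (String × String)))) : Prop := out = combine_items_alt items
instance (items : List (List (String × Int))) (out : (List (Int × Int)) × (Option (List (String × String)))) : Decidable (Spec_combine_items items out) := by unfold Spec_combine_items; infer_instance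

-- ===== CLAIM (what is proved, stated in full; the proofs are below) =====
def Claim_equal_combine_items : Prop := ∀ (items : List (List (String × Int))), Dom_combine_items items → Spec_combine_items items (combine_items items)

-- ===== LEMMAS AND PROOFS =====

-- A's loop is B's parse followed by the fold that A's accumulation performs
lemma loopA_eq_parse (items : List (List (String × Int))) (d : PySem.Dict Int Int) :
    combineLoopA d items =
      match parseItemsB items with
      | .error e => ([], some e)
      | .ok ps => ((ps.foldl (fun d p => d.modify p.1 0 (· + p.2)) d).items, none) := by
  induction items generalizing d with
  | nil => rfl
  | cons it rest ih =>
    simp only [combineLoopA, parseItemsB]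
    cases (PySem.Dict.mk it).get? "product_id" with
    | none => rfl
    | some pid =>
      cases (PySem.Dict.mk it).get? "quantity" with
      | none => rfl
      | some qty =>
        by_cases h : qty ≤ 0
        · simp [h]
        · simp only [h]
          rw [ih]
          cases parseItemsB rest with
          | error e => rfl
          | ok ps => rfl

-- the weighted-counter lookup of A's accumulation
lemma getD_foldl_modify_add (l : List (Int × Int)) (d : PySem.Dict Int Int) (k : Int) :
    (l.foldl (fun d p => d.modify p.1 0 (· + p.2)) d).getD k 0
      = d.getD k 0 + ((l.filter (fun p => p.1 = k)).map (·.2)).sum := by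
  induction l generalizing d with
  | nil => simp
  | cons p rest ih =>
    simp only [List.foldl_cons, List.filter_cons]
    rw [ih]
    by_cases h : p.1 = k
    · simp [h]
      ring
    · simp [h, PySem.Dict.getD_modify, Ne.symm h]

lemma foldl_modify_items_eq (ps : List (Int × Int)) :
    (ps.foldl (fun d p => d.modify p.1 0 (· + p.2)) PySem.Dict.empty).items
      = (PySem.List.dedup (ps.map (·.1))).map
          (fun pid => (pid, ((ps.filter (fun pq => pq.1 = pid)).map (·.2)).sum)) := by
  have hnd : (ps.foldl (fun d p => d.modify p.1 0 (· + p.2)) PySem.Dict.empty).keys.Nodup :=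
    PySem.Dict.nodup_keys_foldl_modify_key ps (·.1) 0 (fun _ p => (· + p.2)) _
      PySem.Dict.nodup_keys_empty
  have hkeys : (ps.foldl (fun d p => d.modify p.1 0 (· + p.2)) PySem.Dict.empty).keys
      = PySem.Set.ofList (ps.map (·.1)) := by
    rw [PySem.Dict.keys_foldl_modify_key ps (·.1) 0 (fun _ p => (· + p.2))]
    simp [PySem.Set.update_nil_left, PySem.Dict.keys_empty]
  rw [PySem.Dict.items_eq_map_keys _ hnd 0, hkeys, PySem.List.dedup_eq_ofList]
  apply List.map_congr_left
  intro k _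
  rw [getD_foldl_modify_add]
  simp

-- ===== VERDICT (by name: the statement is the Claim_ definition above) =====
theorem combine_items_spec : Claim_equal_combine_items := by
  intro items _
  show combine_items items = combine_items_alt items
  unfold combine_items combine_items_alt
  by_cases h : items.isEmpty
  · simp [h]
  · simp only [h]
    rw [loopA_eq_parse]
    cases parseItemsB items with
    | error e => rfl
    | ok ps => simpa using foldl_modify_items_eq ps
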